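-- pv_equiv track=rewrite | github.com/1024chen/jsonPar | main.py | get_attr_list
-- ===== SOURCE A (Python) =====
-- def get_attr_list(json_dic: dict, obj_name: str = '') -> list:
--     attr_list = []
--     if obj_name != '':
--         attr_list.append(obj_name)
--     for dic_key, dic_val in json_dic.items():
--         for attr in list(dic_val):
--             if attr not in attr_list:
--                 attr_list.append(attr)
--     return attr_list
-- ===== SOURCE B (Python) =====
-- def get_attr_list(json_dic: dict, obj_name: str = '') -> list:
--     # hash-based: flatten all candidates, then dict.fromkeys dedups in one O(n) step
--     flat = [obj_name] if obj_name != '' else []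
--     for dic_val in json_dic.values():
--         flat += list(dic_val)
--     return list(dict.fromkeys(flat))
-- ===== Notes on version B (the rewrite author's own statement) =====
-- stated objective: faster
-- what changed: A's inner linear membership scan over the growing result list is removed entirely: B flattens all candidate names and deduplicates once with dict.fromkeys (hash table), O(n) instead of O(n^2).
import Mathlib
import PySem

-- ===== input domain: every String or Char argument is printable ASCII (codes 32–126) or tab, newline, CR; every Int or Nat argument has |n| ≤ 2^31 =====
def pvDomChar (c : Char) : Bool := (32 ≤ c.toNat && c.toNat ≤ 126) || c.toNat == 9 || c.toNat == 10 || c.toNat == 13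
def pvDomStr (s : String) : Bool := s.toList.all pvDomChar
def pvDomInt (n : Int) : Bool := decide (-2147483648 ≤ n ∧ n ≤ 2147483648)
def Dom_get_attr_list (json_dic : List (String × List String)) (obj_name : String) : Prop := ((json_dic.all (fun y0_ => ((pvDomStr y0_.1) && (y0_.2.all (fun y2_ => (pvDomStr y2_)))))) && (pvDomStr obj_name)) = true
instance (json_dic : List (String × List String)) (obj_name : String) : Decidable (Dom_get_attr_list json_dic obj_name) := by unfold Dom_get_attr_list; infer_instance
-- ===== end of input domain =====

-- B removes A's inner linear membership scan: flatten all candidate names, then deduplicate once with dict.fromkeys (objective: faster, O(n) vs O(n^2) in Python).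


-- ===== PORT A =====
def get_attr_list (json_dic : List (String × List String)) (obj_name : String) : List String :=
  let attr_list : List String := []
  let attr_list := if obj_name ≠ "" then attr_list ++ [obj_name] else attr_list
  json_dic.foldl (fun al kv =>
    kv.2.foldl (fun al attr => if attr ∈ al then al else al ++ [attr]) al) attr_list

-- ===== PORT B =====
def get_attr_list_alt (json_dic : List (String × List String)) (obj_name : String) : List String :=
  let flat : List String := if obj_name ≠ "" then [obj_name] else []
  let flat := json_dic.foldl (fun f kv => f ++ kv.2) flat
  PySem.List.dedup flat    -- list(dict.fromkeys(flat))

-- ===== PRECONDITION & SPEC =====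
def Spec_get_attr_list (json_dic : List (String × List String)) (obj_name : String) (out : List String) : Prop := out = get_attr_list_alt json_dic obj_name
instance (json_dic : List (String × List String)) (obj_name : String) (out : List String) : Decidable (Spec_get_attr_list json_dic obj_name out) := by unfold Spec_get_attr_list; infer_instance

-- ===== CLAIM (what is proved, stated in full; the proofs are below) =====
def Claim_equal_get_attr_list : Prop := ∀ (json_dic : List (String × List String)) (obj_name : String), Dom_get_attr_list json_dic obj_name → Spec_get_attr_list json_dic obj_name (get_attr_list json_dic obj_name)

-- ===== LEMMAS AND PROOFS =====

-- A's membership-append step is PySem.Set.add on Strings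
theorem step_eq_add (al : List String) (attr : String) :
    (if attr ∈ al then al else al ++ [attr]) = PySem.Set.add al attr := by
  simp [PySem.Set.add, PySem.Set.contains, List.contains_eq_mem]

-- A's nested loops = Set.add folded over the concatenation of the values
theorem nested_eq_flat (json_dic : List (String × List String)) (acc : List String) :
    json_dic.foldl (fun al kv =>
      kv.2.foldl (fun al attr => if attr ∈ al then al else al ++ [attr]) al) acc
    = (json_dic.flatMap (·.2)).foldl PySem.Set.add acc := by
  induction json_dic generalizing acc with
  | nil => rfl
  | cons kv rest ih =>
    simp only [List.foldl_cons, List.flatMap_cons, List.foldl_append, ih]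
    congr 1
    exact PySem.List.foldl_congr_mem _ _ _ _ (fun al attr _ => step_eq_add al attr)

-- ===== VERDICT (by name: the statement is the Claim_ definition above) =====
theorem get_attr_list_spec : Claim_equal_get_attr_list := by
  intro json_dic obj_name _
  unfold Spec_get_attr_list get_attr_list get_attr_list_alt
  have hflat : ∀ init : List String, json_dic.foldl (fun f kv => f ++ kv.2) init
      = init ++ json_dic.flatMap (·.2) := by
    intro init
    simpa using PySem.List.foldl_append_eq_flatMap (·.2) json_dic init
  simp only [hflat, nested_eq_flat, PySem.List.dedup_eq_ofList, PySem.Set.ofList_eq_foldl,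
    List.foldl_append]
  by_cases h : obj_name = "" <;> simp [h, PySem.Set.add]
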